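-- pv_equiv track=rewrite | github.com/watchfog/IGNITE | src/auto_gamevideo_subtitles/state_machine.py | _debounce_marker_state
-- ===== SOURCE A (Python) =====
-- def _debounce_marker_state(raw: list[bool], min_on: int, min_off: int) -> list[bool]:
--     if not raw:
--         return []
--     out = [raw[0]]
--     state = raw[0]
--     on_streak = 1 if state else 0
--     off_streak = 1 if not state else 0
--     for i in range(1, len(raw)):
--         v = raw[i]
--         if v:
--             on_streak += 1
--             off_streak = 0
--         else:
--             off_streak += 1
--             on_streak = 0
--
--         if not state and on_streak >= min_on:
--             state = True
--         elif state and off_streak >= min_off: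
--             state = False
--         out.append(state)
--     return out
-- ===== SOURCE B (Python) =====
-- def _debounce_marker_state(raw: list[bool], min_on: int, min_off: int) -> list[bool]:
--     if not raw:
--         return []
--     # run-length encode the input in one pass
--     runs = []
--     cur, cnt = raw[0], 1
--     for v in raw[1:]:
--         if v == cur:
--             cnt += 1
--         else:
--             runs.append((cur, cnt))
--             cur, cnt = v, 1
--     runs.append((cur, cnt))
--     # emit output run by run
--     out = []
--     state = raw[0]
--     for v, length in runs:
--         if v == state:
--             out.extend([v] * length)
--         else:
--             t = min_on if v else min_off
--             if length >= t:
--                 k = max(t - 1, 0)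
--                 out.extend([state] * k + [v] * (length - k))
--                 state = v
--             else:
--                 out.extend([state] * length)
--     return out
-- ===== Notes on version B (the rewrite author's own statement) =====
-- stated objective: alternative
-- what changed: Replaces the per-element on/off streak-counter state machine by a run-length encoding pass followed by per-run block arithmetic (each run emits a prefix of the old state and a suffix of the run value computed from the run length and the threshold); Pre_ admits positive thresholds plus the degenerate shapes where a nonpositive threshold never acts, and excludes exactly the inputs where a nonpositive min_on/min_off makes A's '>= threshold' test fire against a freshly reset streak so A's state oscillates, an accident of the counter implementation.
-- outside the precondition, e.g. on _debounce_marker_state([True, True, True], 3, 0): A returns [True, False, True], B returns [True, True, True]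
import Mathlib
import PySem

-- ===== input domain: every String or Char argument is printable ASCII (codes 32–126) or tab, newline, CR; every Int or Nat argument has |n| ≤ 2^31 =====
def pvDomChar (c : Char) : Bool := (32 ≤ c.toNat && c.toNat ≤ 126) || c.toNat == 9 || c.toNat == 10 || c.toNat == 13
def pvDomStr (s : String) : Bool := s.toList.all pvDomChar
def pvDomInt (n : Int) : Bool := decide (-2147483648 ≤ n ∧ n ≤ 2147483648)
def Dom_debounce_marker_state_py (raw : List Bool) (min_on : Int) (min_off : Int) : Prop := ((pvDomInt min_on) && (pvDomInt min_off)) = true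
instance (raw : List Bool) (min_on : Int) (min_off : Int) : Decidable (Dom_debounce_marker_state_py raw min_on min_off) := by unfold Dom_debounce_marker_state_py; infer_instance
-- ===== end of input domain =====

-- B replaces A's per-element on/off streak counters by run-length encoding followed by
-- per-run block arithmetic (objective: alternative decomposition, same O(n) cost).

-- ===== PORT A =====
-- the body of A's for-loop; state = (state, on_streak, off_streak, out)
def pvStepA (min_on min_off : Int) (st : Bool × Int × Int × List Bool) (v : Bool) :
    Bool × Int × Int × List Bool :=
  let on_streak := if v then st.2.1 + 1 else 0
  let off_streak := if v then 0 else st.2.2.1 + 1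
  let state := if !st.1 && decide (min_on ≤ on_streak) then true
    else if st.1 && decide (min_off ≤ off_streak) then false else st.1
  (state, on_streak, off_streak, st.2.2.2 ++ [state])

def debounce_marker_state_py (raw : List Bool) (min_on : Int) (min_off : Int) : List Bool :=
  match raw with
  | [] => []
  | r0 :: rest =>
    (rest.foldl (pvStepA min_on min_off)
      (r0, (if r0 then 1 else 0), (if r0 then 0 else 1), [r0])).2.2.2

-- ===== PORT B =====
-- the run-length-encoding loop body of Source B; state = (runs, cur, cnt)
def pvRleStep (st : List (Bool × Int) × Bool × Int) (v : Bool) : List (Bool × Int) × Bool × Int :=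
  if v = st.2.1 then (st.1, st.2.1, st.2.2 + 1) else (st.1 ++ [(st.2.1, st.2.2)], v, 1)

def pvRle (raw : List Bool) : List (Bool × Int) :=
  match raw with
  | [] => []
  | r0 :: rest =>
    let fin := rest.foldl pvRleStep ([], r0, 1)
    fin.1 ++ [(fin.2.1, fin.2.2)]

-- the body of Source B's loop over the runs; state = (out, state)
def pvRunStep (min_on min_off : Int) (st : List Bool × Bool) (run : Bool × Int) :
    List Bool × Bool :=
  let v := run.1
  let L := run.2
  if v = st.2 then (st.1 ++ List.replicate L.toNat v, st.2)
  else
    let t := if v then min_on else min_off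
    if t ≤ L then
      let k := max (t - 1) 0
      (st.1 ++ (List.replicate k.toNat st.2 ++ List.replicate (L - k).toNat v), v)
    else (st.1 ++ List.replicate L.toNat st.2, st.2)

def debounce_marker_state_py_alt (raw : List Bool) (min_on : Int) (min_off : Int) : List Bool :=
  match raw with
  | [] => []
  | r0 :: _ => ((pvRle raw).foldl (pvRunStep min_on min_off) ([], r0)).1

-- ===== PRECONDITION & SPEC =====
-- Pre_ admits the debounce's natural domain min_on ≥ 1 ∧ min_off ≥ 1, plus the degenerate
-- shapes (≤ 1 element, two distinct elements, a monochrome prefix whose away-threshold is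
-- positive) on which a nonpositive threshold never gets to act; excluded are exactly the
-- inputs where a nonpositive min_on/min_off makes A's '>= threshold' test fire against a
-- freshly reset streak counter, so A's state oscillates — an accident of A's implementation.
def Pre_debounce_marker_state_py (raw : List Bool) (min_on : Int) (min_off : Int) : Prop :=
  (1 ≤ min_on ∧ 1 ≤ min_off) ∨ raw.length ≤ 1 ∨ (raw.length = 2 ∧ raw[0]? ≠ raw[1]?)
    ∨ (1 ≤ min_on ∧ ¬ (true ∈ raw.dropLast)) ∨ (1 ≤ min_off ∧ ¬ (false ∈ raw.dropLast))
instance (raw : List Bool) (min_on : Int) (min_off : Int) : Decidable (Pre_debounce_marker_state_py raw min_on min_off) := by unfold Pre_debounce_marker_state_py; infer_instance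

def pvWitness_debounce_marker_state_py : List Bool × Int × Int := ([true, false, false, true], 2, 2)

def Spec_debounce_marker_state_py (raw : List Bool) (min_on : Int) (min_off : Int) (out : List Bool) : Prop := out = debounce_marker_state_py_alt raw min_on min_off
instance (raw : List Bool) (min_on : Int) (min_off : Int) (out : List Bool) : Decidable (Spec_debounce_marker_state_py raw min_on min_off out) := by unfold Spec_debounce_marker_state_py; infer_instance

-- ===== CLAIM (what is proved, stated in full; the proofs are below) =====
def Claim_equal_debounce_marker_state_py : Prop := ∀ (raw : List Bool) (min_on : Int) (min_off : Int), Dom_debounce_marker_state_py raw min_on min_off → Pre_debounce_marker_state_py raw min_on min_off → Spec_debounce_marker_state_py raw min_on min_off (debounce_marker_state_py raw min_on min_off)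

-- ===== LEMMAS AND PROOFS =====

-- the state transition of A at one element, expressed via the current run streak r
def pvEStep (min_on min_off : Int) (v s : Bool) (r : Int) : Bool :=
  let on : Int := if v then r else 0
  let off : Int := if v then 0 else r
  if !s && decide (min_on ≤ on) then true
  else if s && decide (min_off ≤ off) then false else s

-- elementwise debounce recursion carrying (state, previous value, current streak)
def pvCore (min_on min_off : Int) : Bool → Bool → Int → List Bool → List Bool
  | _, _, _, [] => []
  | s, prev, r, v :: rest =>
    let r' := if v = prev then r + 1 else 1
    let s' := pvEStep min_on min_off v s r'
    s' :: pvCore min_on min_off s' v r' rest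

def pvFlat (rs : List (Bool × Int)) : List Bool :=
  rs.flatMap (fun p => List.replicate p.2.toNat p.1)

-- canonical right-to-left RLE and its merge step, used to reason about pvRle
def pvMerge (v : Bool) (c : Int) : List (Bool × Int) → List (Bool × Int)
  | [] => [(v, c)]
  | (w, n) :: rs => if v = w then (v, c + n) :: rs else (v, c) :: (w, n) :: rs

def pvRleSpec : List Bool → List (Bool × Int)
  | [] => []
  | v :: l => pvMerge v 1 (pvRleSpec l)

-- adjacent runs have distinct values
def pvNeighborsOk : List (Bool × Int) → Prop
  | [] => True
  | [_] => True
  | p :: q :: rs => p.1 ≠ q.1 ∧ pvNeighborsOk (q :: rs)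

-- ---- small facts ----

theorem pvEStep_char (mo mf : Int) (v s : Bool) (r : Int) :
    pvEStep mo mf v s r =
      if (if s = v then (if v then mf else mo) ≤ 0 else (if v then mo else mf) ≤ r)
      then !s else s := by
  cases v <;> cases s <;> simp [pvEStep]

theorem pvCore_reset (mo mf : Int) (s prev v : Bool) (r : Int) (l : List Bool)
    (h : v ≠ prev) : pvCore mo mf s prev r (v :: l) = pvCore mo mf s v 0 (v :: l) := by
  simp [pvCore, h]

theorem pvAfold (mo mf : Int) :
    ∀ (l : List Bool) (s prev : Bool) (r : Int) (out : List Bool),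
    (l.foldl (pvStepA mo mf)
      (s, (if prev then r else 0), (if prev then 0 else r), out)).2.2.2
      = out ++ pvCore mo mf s prev r l := by
  intro l
  induction l with
  | nil => intro s prev r out; simp [pvCore]
  | cons v rest ih =>
    intro s prev r out
    have hstep : pvStepA mo mf (s, (if prev then r else 0), (if prev then 0 else r), out) v
        = (pvEStep mo mf v s (if v = prev then r + 1 else 1),
           (if v then (if v = prev then r + 1 else 1) else 0),
           (if v then 0 else (if v = prev then r + 1 else 1)),
           out ++ [pvEStep mo mf v s (if v = prev then r + 1 else 1)]) := by
      cases v <;> cases prev <;> simp [pvStepA, pvEStep]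
    simp only [List.foldl_cons, hstep]
    rw [ih (pvEStep mo mf v s (if v = prev then r + 1 else 1)) v (if v = prev then r + 1 else 1) _]
    simp [pvCore]

-- one step of pvCore on an element equal to the previous one
theorem pvCore_cons_same (mo mf : Int) (s v : Bool) (r : Int) (l : List Bool) :
    pvCore mo mf s v r (v :: l)
      = pvEStep mo mf v s (r + 1) :: pvCore mo mf (pvEStep mo mf v s (r + 1)) v (r + 1) l := by
  simp [pvCore]

-- with positive thresholds, elements matching the state never change it
theorem pvKeep (mo mf : Int) (v : Bool) (hv : 1 ≤ (if v then mf else mo)) :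
    ∀ (n : Nat) (r : Int) (rest : List Bool),
    pvCore mo mf v v r (List.replicate n v ++ rest)
      = List.replicate n v ++ pvCore mo mf v v (r + n) rest := by
  intro n
  induction n with
  | zero => intro r rest; simp
  | succ m ih =>
    intro r rest
    have hE : pvEStep mo mf v v (r + 1) = v := by
      rw [pvEStep_char]
      have h0 : ¬ ((if v then mf else mo) ≤ 0) := by omega
      simp [h0]
    rw [List.replicate_succ, List.cons_append, pvCore_cons_same, hE, ih (r + 1) rest]
    rw [show r + 1 + (m : Int) = r + ((m + 1 : Nat) : Int) by push_cast; ring]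
    simp

-- a run differing from the state, entered at streak position a ≤ threshold:
-- A keeps the old state until the streak reaches the threshold, then flips and stays
theorem pvDiffRun (mo mf : Int) (hmo : 1 ≤ mo) (hmf : 1 ≤ mf) (s : Bool) :
    ∀ (n : Nat) (a : Int) (rest : List Bool),
    1 ≤ a → a ≤ (if !s then mo else mf) →
    pvCore mo mf s (!s) (a - 1) (List.replicate n (!s) ++ rest)
      = (if (n : Int) ≤ (if !s then mo else mf) - a
         then List.replicate n s ++ pvCore mo mf s (!s) (a - 1 + n) rest
         else List.replicate ((if !s then mo else mf) - a).toNat s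
              ++ (List.replicate ((n : Int) - ((if !s then mo else mf) - a)).toNat (!s)
              ++ pvCore mo mf (!s) (!s) (a - 1 + n) rest)) := by
  intro n
  induction n with
  | zero =>
    intro a rest ha ha2
    have h0 : ((0 : Nat) : Int) ≤ (if !s then mo else mf) - a := by push_cast; omega
    rw [if_pos h0]
    simp
  | succ m ih =>
    intro a rest ha ha2
    have hne : ¬ (s = !s) := by cases s <;> simp
    have hE : pvEStep mo mf (!s) s a = if (if !s then mo else mf) ≤ a then !s else s := by
      rw [pvEStep_char]; simp [hne]
    rw [List.replicate_succ, List.cons_append, pvCore_cons_same,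
        show a - 1 + 1 = a by omega, hE]
    by_cases hta : (if !s then mo else mf) ≤ a
    · -- streak reached the threshold: flip here, then pvKeep
      rw [if_pos hta]
      rw [pvKeep mo mf (!s) (by cases s <;> simp <;> omega) m a rest]
      rw [if_neg (show ¬ (((m + 1 : Nat) : Int) ≤ (if !s then mo else mf) - a) by push_cast; omega)]
      rw [show ((if !s then mo else mf) - a).toNat = 0 by omega]
      rw [show (((m + 1 : Nat) : Int) - ((if !s then mo else mf) - a)).toNat = m + 1 by push_cast; omega]
      rw [show a - 1 + ((m + 1 : Nat) : Int) = a + (m : Int) by push_cast; ring]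
      simp [List.replicate_succ]
    · -- below the threshold: old state, recurse at streak position a + 1
      rw [if_neg hta]
      have hih := ih (a + 1) rest (by omega) (by omega)
      rw [show a + 1 - 1 = a by omega] at hih
      rw [hih]
      by_cases hm : (m : Int) ≤ (if !s then mo else mf) - (a + 1)
      · rw [if_pos hm]
        rw [if_pos (show ((m + 1 : Nat) : Int) ≤ (if !s then mo else mf) - a by push_cast; omega)]
        rw [show a - 1 + ((m + 1 : Nat) : Int) = a + 1 - 1 + (m : Int) by push_cast; ring]
        simp [List.replicate_succ]
      · rw [if_neg hm]
        rw [if_neg (show ¬ (((m + 1 : Nat) : Int) ≤ (if !s then mo else mf) - a) by push_cast; omega)]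
        rw [show ((if !s then mo else mf) - a).toNat
              = ((if !s then mo else mf) - (a + 1)).toNat + 1 by omega]
        rw [show (((m + 1 : Nat) : Int) - ((if !s then mo else mf) - a)).toNat
              = ((m : Int) - ((if !s then mo else mf) - (a + 1))).toNat by push_cast; omega]
        rw [show a - 1 + ((m + 1 : Nat) : Int) = a + 1 - 1 + (m : Int) by push_cast; ring]
        simp [List.replicate_succ]

-- B's fold over the runs computes A's elementwise recursion over the flattened runs
theorem pvBfold (mo mf : Int) (hmo : 1 ≤ mo) (hmf : 1 ≤ mf) :
    ∀ (rs : List (Bool × Int)) (out : List Bool) (s prev : Bool) (r : Int),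
    (∀ p ∈ rs, 1 ≤ p.2) → pvNeighborsOk rs →
    (∀ p ∈ rs.head?, p.1 ≠ prev) →
    (rs.foldl (pvRunStep mo mf) (out, s)).1
      = out ++ pvCore mo mf s prev r (pvFlat rs) := by
  intro rs
  induction rs with
  | nil => intro out s prev r _ _ _; simp [pvFlat, pvCore]
  | cons p rs' ih =>
    intro out s prev r hcnt hnb hhd
    obtain ⟨v, L⟩ := p
    have hL : 1 ≤ L := hcnt (v, L) (by simp)
    have hvprev : v ≠ prev := hhd (v, L) (by simp)
    obtain ⟨m, hm⟩ : ∃ m, L.toNat = m + 1 := ⟨L.toNat - 1, by omega⟩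
    have hLm : ((m + 1 : Nat) : Int) = L := by omega
    have hcnt' : ∀ p ∈ rs', 1 ≤ p.2 := fun p hp => hcnt p (List.mem_cons_of_mem _ hp)
    have hnb' : pvNeighborsOk rs' := by
      cases rs' with
      | nil => trivial
      | cons q rs'' => exact hnb.2
    have hhd' : ∀ p ∈ rs'.head?, p.1 ≠ v := by
      cases rs' with
      | nil => simp
      | cons q rs'' =>
        intro p hp
        simp at hp
        subst hp
        exact (hnb.1 ∘ Eq.symm)
    have hflat : pvFlat ((v, L) :: rs') = List.replicate (m + 1) v ++ pvFlat rs' := by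
      simp [pvFlat, hm]
    rw [hflat]
    rw [show List.replicate (m+1) v ++ pvFlat rs' = v :: (List.replicate m v ++ pvFlat rs') by
      simp [List.replicate_succ]]
    rw [pvCore_reset mo mf s prev v r _ hvprev]
    rw [show v :: (List.replicate m v ++ pvFlat rs') = List.replicate (m+1) v ++ pvFlat rs' by
      simp [List.replicate_succ]]
    by_cases hsv : v = s
    · -- run matches the state: emitted whole, state kept
      subst hsv
      have hstep : pvRunStep mo mf (out, v) (v, L) = (out ++ List.replicate L.toNat v, v) := by
        simp [pvRunStep]
      rw [List.foldl_cons, hstep]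
      rw [pvKeep mo mf v (by cases v <;> simp <;> omega) (m+1) 0 (pvFlat rs')]
      rw [ih (out ++ List.replicate L.toNat v) v v (0 + ((m+1 : Nat) : Int)) hcnt' hnb' hhd']
      simp [hm]
    · -- run differs from the state
      have hvs : v = !s := by cases s <;> cases v <;> simp_all
      subst hvs
      have hts : 1 ≤ (if !s then mo else mf) := by cases s <;> simp <;> omega
      have hrun := pvDiffRun mo mf hmo hmf s (m+1) 1 (pvFlat rs') (by omega) hts
      rw [show (1 : Int) - 1 = 0 by omega] at hrun
      rw [hrun]
      set t := (if !s then mo else mf) with ht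
      have hne : ¬ ((!s) = s) := by cases s <;> simp
      by_cases hflip : t ≤ L
      · have hcond : ¬ (((m+1 : Nat) : Int) ≤ t - 1) := by omega
        rw [if_neg hcond]
        have hstep : pvRunStep mo mf (out, s) (!s, L)
            = (out ++ (List.replicate (max (t-1) 0).toNat s
                ++ List.replicate (L - max (t-1) 0).toNat (!s)), !s) := by
          simp only [pvRunStep, hne, if_false, ← ht]
          rw [if_pos hflip]
        rw [List.foldl_cons, hstep]
        have hk1 : (max (t-1) 0).toNat = (t - 1).toNat := by omega
        have hk2 : (L - max (t-1) 0).toNat = (((m+1 : Nat) : Int) - (t - 1)).toNat := by omega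
        rw [ih (out ++ (List.replicate (max (t-1) 0).toNat s
              ++ List.replicate (L - max (t-1) 0).toNat (!s))) (!s) (!s)
              (0 + ((m+1 : Nat) : Int)) hcnt' hnb' hhd']
        rw [hk1, hk2]
        simp
      · have hcond : ((m+1 : Nat) : Int) ≤ t - 1 := by omega
        rw [if_pos hcond]
        have hstep : pvRunStep mo mf (out, s) (!s, L)
            = (out ++ List.replicate L.toNat s, s) := by
          simp only [pvRunStep, hne, if_false, ← ht]
          rw [if_neg hflip]
        rw [List.foldl_cons, hstep]
        rw [ih (out ++ List.replicate L.toNat s) s (!s) (0 + ((m+1 : Nat) : Int)) hcnt' hnb' hhd']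
        simp [hm]

-- ---- rle correctness ----

theorem pvMerge_cons_eq (v : Bool) (c n : Int) (rs : List (Bool × Int)) :
    pvMerge v c ((v, n) :: rs) = (v, c + n) :: rs := by
  simp [pvMerge]

theorem pvMerge_cons_ne (v w : Bool) (c n : Int) (rs : List (Bool × Int)) (h : v ≠ w) :
    pvMerge v c ((w, n) :: rs) = (v, c) :: (w, n) :: rs := by
  simp [pvMerge, h]

theorem pvMerge_merge (c : Bool) (cnt : Int) (rs : List (Bool × Int)) :
    pvMerge c cnt (pvMerge c 1 rs) = pvMerge c (cnt + 1) rs := by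
  cases rs with
  | nil => simp [pvMerge]
  | cons p rs' =>
    obtain ⟨w, n⟩ := p
    by_cases hw : c = w
    · subst hw; simp [pvMerge]; omega
    · simp [pvMerge, hw]

theorem pvMerge_head (v : Bool) (cnt : Int) (rs : List (Bool × Int)) :
    ∃ c rs', pvMerge v cnt rs = (v, c) :: rs' := by
  cases rs with
  | nil => exact ⟨cnt, [], rfl⟩
  | cons p rs' =>
    obtain ⟨w, n⟩ := p
    by_cases hw : v = w
    · subst hw; exact ⟨cnt + n, rs', by simp [pvMerge]⟩
    · exact ⟨cnt, (w, n) :: rs', by simp [pvMerge, hw]⟩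

theorem pvMerge_ne (w v : Bool) (cnt c : Int) (rs : List (Bool × Int)) (h : w ≠ v) :
    pvMerge w cnt (pvMerge v c rs) = (w, cnt) :: pvMerge v c rs := by
  obtain ⟨d, rs', hd⟩ := pvMerge_head v c rs
  rw [hd]
  simp [pvMerge, h]

theorem pvRle_go (l : List Bool) :
    ∀ (runs : List (Bool × Int)) (cur : Bool) (cnt : Int),
    ((l.foldl pvRleStep (runs, cur, cnt)).1
        ++ [((l.foldl pvRleStep (runs, cur, cnt)).2.1, (l.foldl pvRleStep (runs, cur, cnt)).2.2)])
      = runs ++ pvMerge cur cnt (pvRleSpec l) := by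
  induction l with
  | nil => intro runs cur cnt; simp [pvMerge, pvRleSpec]
  | cons v l' ih =>
    intro runs cur cnt
    by_cases hv : v = cur
    · subst hv
      have hstep : pvRleStep (runs, v, cnt) v = (runs, v, cnt + 1) := by simp [pvRleStep]
      rw [List.foldl_cons, hstep, ih runs v (cnt + 1)]
      simp [pvRleSpec, pvMerge_merge]
    · have hstep : pvRleStep (runs, cur, cnt) v = (runs ++ [(cur, cnt)], v, 1) := by
        simp [pvRleStep, hv]
      rw [List.foldl_cons, hstep, ih (runs ++ [(cur, cnt)]) v 1]
      have hne : cur ≠ v := fun h => hv h.symm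
      simp [pvRleSpec, pvMerge_ne cur v cnt 1 (pvRleSpec l') hne]

theorem pvRle_eq_spec (raw : List Bool) : pvRle raw = pvRleSpec raw := by
  cases raw with
  | nil => rfl
  | cons r0 rest =>
    have := pvRle_go rest [] r0 1
    simpa [pvRle, pvRleSpec] using this

theorem pvMerge_cnt (v : Bool) (c : Int) (rs : List (Bool × Int)) (hc : 1 ≤ c)
    (hrs : ∀ p ∈ rs, 1 ≤ p.2) : ∀ p ∈ pvMerge v c rs, 1 ≤ p.2 := by
  intro p hp
  cases rs with
  | nil =>
    simp [pvMerge] at hp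
    subst hp; simpa using hc
  | cons q rs' =>
    obtain ⟨w, n⟩ := q
    have hn : 1 ≤ n := by simpa using hrs (w, n) (by simp)
    by_cases hw : v = w
    · subst hw
      rw [pvMerge_cons_eq] at hp
      rcases List.mem_cons.1 hp with h | h
      · subst h; simp; omega
      · exact hrs p (List.mem_cons_of_mem _ h)
    · rw [pvMerge_cons_ne v w c n rs' hw] at hp
      rcases List.mem_cons.1 hp with h | h
      · subst h; simpa using hc
      · exact hrs p h

theorem pvRleSpec_cnt : ∀ (l : List Bool), ∀ p ∈ pvRleSpec l, 1 ≤ p.2 := by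
  intro l
  induction l with
  | nil => simp [pvRleSpec]
  | cons v l' ih =>
    simp only [pvRleSpec]
    exact pvMerge_cnt v 1 (pvRleSpec l') (by omega) ih

theorem pvRleSpec_flat (l : List Bool) : pvFlat (pvRleSpec l) = l := by
  induction l with
  | nil => simp [pvRleSpec, pvFlat]
  | cons v l' ih =>
    simp only [pvRleSpec]
    cases hrs : pvRleSpec l' with
    | nil =>
      rw [hrs] at ih
      simp [pvFlat] at ih
      simp [pvMerge, pvFlat, ← ih]
    | cons q rs' =>
      obtain ⟨w, n⟩ := q
      have hn : 1 ≤ n := by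
        have := pvRleSpec_cnt l' (w, n) (by rw [hrs]; simp); simpa using this
      rw [hrs] at ih
      by_cases hw : v = w
      · subst hw
        rw [pvMerge_cons_eq]
        simp only [pvFlat, List.flatMap_cons] at ih ⊢
        rw [show (1 + n).toNat = 1 + n.toNat from by omega]
        rw [List.replicate_add]
        simp [← ih]
      · rw [pvMerge_cons_ne v w 1 n rs' hw]
        simp only [pvFlat, List.flatMap_cons] at ih ⊢
        simp [← ih]

theorem pvRleSpec_nb : ∀ (l : List Bool), pvNeighborsOk (pvRleSpec l) := by
  intro l
  induction l with
  | nil => trivial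
  | cons v l' ih =>
    simp only [pvRleSpec]
    cases hrs : pvRleSpec l' with
    | nil => simp [pvMerge, pvNeighborsOk]
    | cons q rs' =>
      obtain ⟨w, n⟩ := q
      rw [hrs] at ih
      by_cases hw : v = w
      · subst hw
        rw [pvMerge_cons_eq]
        cases rs' with
        | nil => trivial
        | cons q2 rs'' => exact ⟨ih.1, ih.2⟩
      · rw [pvMerge_cons_ne v w 1 n rs' hw]
        exact ⟨by simpa using hw, ih⟩

theorem pvRleSpec_head (v : Bool) (l : List Bool) :
    ∃ c rs, pvRleSpec (v :: l) = (v, c) :: rs := by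
  simp only [pvRleSpec]
  exact pvMerge_head v 1 (pvRleSpec l)

theorem pvA_core (mo mf : Int) (r0 : Bool) (rest : List Bool) :
    debounce_marker_state_py (r0 :: rest) mo mf = r0 :: pvCore mo mf r0 r0 1 rest := by
  have h := pvAfold mo mf rest r0 r0 1 [r0]
  simpa [debounce_marker_state_py] using h

-- ===== VERDICT (by name: the statement is the Claim_ definition above) =====

-- both thresholds positive: the general run-by-run argument
theorem pvEq_main (mo mf : Int) (hmo : 1 ≤ mo) (hmf : 1 ≤ mf) (raw : List Bool) :
    debounce_marker_state_py raw mo mf = debounce_marker_state_py_alt raw mo mf := by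
  cases raw with
  | nil => rfl
  | cons r0 rest =>
    obtain ⟨L0, rs, hrle⟩ := pvRleSpec_head r0 rest
    have hcnt := pvRleSpec_cnt (r0 :: rest)
    have hnb := pvRleSpec_nb (r0 :: rest)
    rw [hrle] at hcnt hnb
    have hL0 : 1 ≤ L0 := by simpa using hcnt (r0, L0) (by simp)
    obtain ⟨m, hm⟩ : ∃ m, L0.toNat = m + 1 := ⟨L0.toNat - 1, by omega⟩
    have hflat := pvRleSpec_flat (r0 :: rest)
    rw [hrle] at hflat
    have hrest : rest = List.replicate m r0 ++ pvFlat rs := by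
      simp only [pvFlat, List.flatMap_cons, hm, List.replicate_succ, List.cons_append] at hflat
      injection hflat with _ h2
      exact h2.symm
    have hcnt' : ∀ p ∈ rs, 1 ≤ p.2 := fun p hp => hcnt p (List.mem_cons_of_mem _ hp)
    have hnb' : pvNeighborsOk rs := by
      cases rs with
      | nil => trivial
      | cons q rs'' => exact hnb.2
    have hhd' : ∀ p ∈ rs.head?, p.1 ≠ r0 := by
      cases rs with
      | nil => simp
      | cons q rs'' =>
        intro p hp
        simp at hp
        subst hp
        exact (hnb.1 ∘ Eq.symm)
    have hB : debounce_marker_state_py_alt (r0 :: rest) mo mf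
        = (((r0, L0) :: rs).foldl (pvRunStep mo mf) ([], r0)).1 := by
      simp only [debounce_marker_state_py_alt, pvRle_eq_spec, hrle]
    have hfirst : pvRunStep mo mf ([], r0) (r0, L0) = (List.replicate L0.toNat r0, r0) := by
      simp [pvRunStep]
    rw [pvA_core, hB, List.foldl_cons, hfirst]
    rw [pvBfold mo mf hmo hmf rs (List.replicate L0.toNat r0) r0 r0 (1 + (m : Int)) hcnt' hnb' hhd']
    rw [hrest]
    rw [pvKeep mo mf r0 (by cases r0 <;> simp <;> omega) m 1 (pvFlat rs)]
    simp [hm, List.replicate_succ]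

-- at most one element: both programs echo the input
theorem pvEq_small (mo mf : Int) (raw : List Bool) (h : raw.length ≤ 1) :
    debounce_marker_state_py raw mo mf = debounce_marker_state_py_alt raw mo mf := by
  match raw, h with
  | [], _ => rfl
  | [x], _ =>
    simp [debounce_marker_state_py, debounce_marker_state_py_alt, pvRle, pvRunStep]

-- exactly two distinct elements: both programs flip (or keep) at the second element alike
theorem pvEq_two (mo mf : Int) (x y : Bool) (hxy : x ≠ y) :
    debounce_marker_state_py [x, y] mo mf = debounce_marker_state_py_alt [x, y] mo mf := by
  cases x <;> cases y <;> try exact absurd rfl hxy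
  · -- [false, true]
    by_cases h1 : mo ≤ 1
    · simp [debounce_marker_state_py, debounce_marker_state_py_alt, pvStepA,
        pvRle, pvRleStep, pvRunStep, h1]
    · simp [debounce_marker_state_py, debounce_marker_state_py_alt, pvStepA,
        pvRle, pvRleStep, pvRunStep, h1]
  · -- [true, false]
    by_cases h1 : mf ≤ 1
    · simp [debounce_marker_state_py, debounce_marker_state_py_alt, pvStepA,
        pvRle, pvRleStep, pvRunStep, h1]
    · simp [debounce_marker_state_py, debounce_marker_state_py_alt, pvStepA,
        pvRle, pvRleStep, pvRunStep, h1]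

theorem pvRleSpec_rep (w : Bool) : ∀ (k : Nat),
    pvRleSpec (List.replicate (k + 1) w) = [(w, (k : Int) + 1)] := by
  intro k
  induction k with
  | zero => simp [pvRleSpec, pvMerge]
  | succ m ih =>
    rw [List.replicate_succ, show pvRleSpec (w :: List.replicate (m + 1) w)
        = pvMerge w 1 (pvRleSpec (List.replicate (m + 1) w)) from rfl, ih, pvMerge_cons_eq]
    have hc : (1 : Int) + ((m : Int) + 1) = ((m + 1 : Nat) : Int) + 1 := by push_cast; ring
    rw [hc]

theorem pvRleSpec_rep' (w : Bool) : ∀ (k : Nat),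
    pvRleSpec (List.replicate (k + 1) w ++ [!w]) = [(w, (k : Int) + 1), (!w, 1)] := by
  intro k
  induction k with
  | zero =>
    have hne : w ≠ !w := by cases w <;> simp
    rw [show List.replicate (0 + 1) w ++ [!w] = [w, !w] by simp]
    show pvMerge w 1 (pvMerge (!w) 1 (pvRleSpec [])) = _
    simp [pvRleSpec, pvMerge, hne]
  | succ m ih =>
    rw [List.replicate_succ, List.cons_append,
      show pvRleSpec (w :: (List.replicate (m + 1) w ++ [!w]))
        = pvMerge w 1 (pvRleSpec (List.replicate (m + 1) w ++ [!w])) from rfl, ih, pvMerge_cons_eq]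
    have hc : (1 : Int) + ((m : Int) + 1) = ((m + 1 : Nat) : Int) + 1 := by push_cast; ring
    rw [hc]

-- a monochrome list with a positive away-threshold (possibly with one trailing opposite
-- element): both programs keep the state through the prefix and agree on the last element
theorem pvEq_rep (mo mf : Int) (w : Bool) (hw : 1 ≤ (if w then mf else mo)) (k : Nat)
    (tail : List Bool) (htail : tail = [] ∨ tail = [!w]) :
    debounce_marker_state_py (w :: (List.replicate k w ++ tail)) mo mf
      = debounce_marker_state_py_alt (w :: (List.replicate k w ++ tail)) mo mf := by
  have hrep : w :: (List.replicate k w ++ tail) = List.replicate (k + 1) w ++ tail := by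
    simp [List.replicate_succ]
  have hA : debounce_marker_state_py (w :: (List.replicate k w ++ tail)) mo mf
      = w :: (List.replicate k w ++ pvCore mo mf w w (1 + k) tail) := by
    rw [pvA_core, pvKeep mo mf w hw k 1 tail]
  have hT : (if !w then mo else mf) = (if w then mf else mo) := by cases w <;> simp
  rcases htail with h | h
  · subst h
    rw [hA]
    have hlist : pvRle (w :: (List.replicate k w ++ [])) = [(w, (k : Int) + 1)] := by
      rw [pvRle_eq_spec,
        show (w :: (List.replicate k w ++ []) : List Bool) = List.replicate (k + 1) w by
          simp [List.replicate_succ]]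
      exact pvRleSpec_rep w k
    have hBdef : debounce_marker_state_py_alt (w :: (List.replicate k w ++ [])) mo mf
        = ((pvRle (w :: (List.replicate k w ++ []))).foldl (pvRunStep mo mf) ([], w)).1 := rfl
    rw [hBdef, hlist]
    have hstep : pvRunStep mo mf ([], w) (w, (k : Int) + 1)
        = (List.replicate ((k : Int) + 1).toNat w, w) := by
      simp [pvRunStep]
    rw [List.foldl_cons, hstep]
    simp [pvCore, show ((k : Int) + 1).toNat = k + 1 by omega, List.replicate_succ]
  · subst h
    rw [hA]
    have hlist : pvRle (w :: (List.replicate k w ++ [!w])) = [(w, (k : Int) + 1), (!w, 1)] := by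
      rw [pvRle_eq_spec,
        show (w :: (List.replicate k w ++ [!w]) : List Bool)
            = List.replicate (k + 1) w ++ [!w] by simp [List.replicate_succ]]
      exact pvRleSpec_rep' w k
    have hBdef : debounce_marker_state_py_alt (w :: (List.replicate k w ++ [!w])) mo mf
        = ((pvRle (w :: (List.replicate k w ++ [!w]))).foldl (pvRunStep mo mf) ([], w)).1 := rfl
    rw [hBdef, hlist]
    have hstep : pvRunStep mo mf ([], w) (w, (k : Int) + 1)
        = (List.replicate ((k : Int) + 1).toNat w, w) := by
      simp [pvRunStep]
    rw [List.foldl_cons, hstep]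
    have hne : ¬ ((!w) = w) := by cases w <;> simp
    have hcore : pvCore mo mf w w (1 + (k : Int)) [!w]
        = [if (if w then mf else mo) ≤ 1 then !w else w] := by
      cases w <;> simp [pvCore, pvEStep]
    rw [hcore]
    by_cases hle : (if w then mf else mo) ≤ 1
    · have ht1 : (if !w then mo else mf) ≤ (1 : Int) := by rw [hT]; exact hle
      have hstep2 : pvRunStep mo mf (List.replicate ((k : Int) + 1).toNat w, w) (!w, 1)
          = (List.replicate ((k : Int) + 1).toNat w
              ++ (List.replicate (max ((if !w then mo else mf) - 1) 0).toNat w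
                  ++ List.replicate ((1 : Int) - max ((if !w then mo else mf) - 1) 0).toNat (!w)), !w) := by
        simp only [pvRunStep, hne, if_false]
        rw [if_pos ht1]
      rw [List.foldl_cons, hstep2]
      rw [show (max ((if !w then mo else mf) - 1) 0).toNat = 0 by rw [hT]; omega]
      rw [show ((1 : Int) - max ((if !w then mo else mf) - 1) 0).toNat = 1 by rw [hT]; omega]
      simp [hle, show ((k : Int) + 1).toNat = k + 1 by omega, List.replicate_succ]
    · have ht1 : ¬ ((if !w then mo else mf) ≤ (1 : Int)) := by rw [hT]; exact hle
      have hstep2 : pvRunStep mo mf (List.replicate ((k : Int) + 1).toNat w, w) (!w, 1)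
          = (List.replicate ((k : Int) + 1).toNat w ++ List.replicate (1 : Int).toNat w, w) := by
        simp only [pvRunStep, hne, if_false]
        rw [if_neg ht1]
      rw [List.foldl_cons, hstep2]
      simp [hle, show ((k : Int) + 1).toNat = k + 1 by omega, List.replicate_succ]

-- no true (resp. false) strictly before the last element, with the matching threshold
-- positive: the input is a monochrome prefix plus at most one trailing opposite element
theorem pvEq_nomid (mo mf : Int) (w : Bool) (hw : 1 ≤ (if w then mf else mo))
    (raw : List Bool) (h2 : 2 ≤ raw.length) (hmid : ¬ ((!w) ∈ raw.dropLast)) :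
    debounce_marker_state_py raw mo mf = debounce_marker_state_py_alt raw mo mf := by
  have hne : raw ≠ [] := by intro h; rw [h] at h2; simp at h2
  have hdl : raw.dropLast = List.replicate raw.dropLast.length w := by
    apply List.eq_replicate_of_mem
    intro b hb
    cases hbw : b with
    | true =>
      cases w with
      | true => rfl
      | false => exact absurd (hbw ▸ hb) (by simpa using hmid)
    | false =>
      cases w with
      | false => rfl
      | true => exact absurd (hbw ▸ hb) (by simpa using hmid)
  have hsplit : raw = raw.dropLast ++ [raw.getLast hne] := (List.dropLast_append_getLast hne).symm
  obtain ⟨m, hm⟩ : ∃ m, raw.dropLast.length = m + 1 := by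
    refine ⟨raw.dropLast.length - 1, ?_⟩
    have := raw.length_dropLast
    omega
  rw [hdl, hm] at hsplit
  by_cases hlast : raw.getLast hne = w
  · have hshape : raw = w :: (List.replicate (m + 1) w ++ []) := by
      rw [hsplit, hlast]
      simp [List.replicate_succ, ← List.replicate_succ']
    rw [hshape]
    exact pvEq_rep mo mf w hw (m + 1) [] (Or.inl rfl)
  · have hlast' : raw.getLast hne = !w := by
      revert hlast
      cases raw.getLast hne <;> cases w <;> simp
    have hshape : raw = w :: (List.replicate m w ++ [!w]) := by
      rw [hsplit, hlast']
      simp [List.replicate_succ]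
    rw [hshape]
    exact pvEq_rep mo mf w hw m [!w] (Or.inr rfl)

theorem debounce_marker_state_py_spec : Claim_equal_debounce_marker_state_py := by
  unfold Claim_equal_debounce_marker_state_py
  intro raw mo mf _ hpre
  unfold Spec_debounce_marker_state_py
  rcases hpre with ⟨hmo, hmf⟩ | hlen | ⟨hlen2, hne01⟩ | ⟨hmo, hnt⟩ | ⟨hmf, hnf⟩
  · exact pvEq_main mo mf hmo hmf raw
  · exact pvEq_small mo mf raw hlen
  · cases raw with
    | nil => simp at hlen2
    | cons x t =>
      cases t with
      | nil => simp at hlen2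
      | cons y t2 =>
        cases t2 with
        | cons z t3 => simp at hlen2
        | nil =>
          apply pvEq_two mo mf x y
          intro h
          exact hne01 (by simp [h])
  · by_cases hl : raw.length ≤ 1
    · exact pvEq_small mo mf raw hl
    · exact pvEq_nomid mo mf false (by simpa using hmo) raw (by omega) (by simpa using hnt)
  · by_cases hl : raw.length ≤ 1
    · exact pvEq_small mo mf raw hl
    · exact pvEq_nomid mo mf true (by simpa using hmf) raw (by omega) (by simpa using hnf)
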